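-- pv_equiv track=rewrite | github.com/DragosteSergiu/Facultate | Lab3FLCD.py | isValidNumericConstant
-- ===== SOURCE A (Python) =====
-- digits = '0123456789'
--
-- nonzerodigits = '123456789'
--
-- operators = ['+', '-']
--
-- def isValidNumericConstant(constant):
--     if constant[0] in operators and len(constant) == 1:
--         return False
--     if constant[0] in operators:
--         position = 1
--         if constant[position] == '0':
--             return False
--         if len(constant) == 2:
--             if nonzerodigits.find(constant[position]) > -1:
--                 return True
--         while position < len(constant):
--             if position == 1 and nonzerodigits.find(constant[position]) == -1:
--                 return False
--             if position > 1 and digits.find(constant[position]) == -1: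
--                 return False
--             position += 1
--         return True
--     if constant[0] not in operators:
--         position = 0
--         if len(constant) == 1:
--             if digits.find(constant[position]) > -1:
--                 return True
--         while position < len(constant):
--             if position == 0 and nonzerodigits.find(constant[position]) == -1:
--                 return False
--             if position > 0 and digits.find(constant[position]) == -1:
--                 return False
--             position += 1
--         return True
-- ===== SOURCE B (Python) =====
-- def isValidNumericConstant(constant):
--     if constant == '0':
--         return True
--     body = constant[1:] if constant[:1] in '+-' else constant
--     return body.isdigit() and not body.startswith('0')
-- ===== Notes on version B (the rewrite author's own statement) =====
-- stated objective: simpler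
-- what changed: Replaces A's operator/non-operator branch ladder with two positional while-loops by a short shape check: special-case the single-zero string, strip an optional sign, then require a nonempty all-digit body whose first digit is nonzero.
import Mathlib
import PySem

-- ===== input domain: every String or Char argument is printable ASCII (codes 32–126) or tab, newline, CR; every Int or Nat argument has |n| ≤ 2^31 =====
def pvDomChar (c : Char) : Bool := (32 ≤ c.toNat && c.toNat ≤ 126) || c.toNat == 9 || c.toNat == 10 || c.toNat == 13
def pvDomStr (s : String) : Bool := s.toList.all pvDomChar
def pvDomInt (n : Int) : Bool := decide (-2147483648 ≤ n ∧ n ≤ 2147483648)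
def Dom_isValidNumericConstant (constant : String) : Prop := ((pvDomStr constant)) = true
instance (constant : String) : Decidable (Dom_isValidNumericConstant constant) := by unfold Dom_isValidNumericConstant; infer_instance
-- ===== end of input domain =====

-- B replaces A's positional while-loops and operator/non-operator branch ladder by a
-- sign-stripping shape check ('0', or optional sign + digits with no leading zero): simpler.
-- A raises IndexError on "" (excluded by Pre_).

-- ===== PORT A =====
def pvDigits : List Char := ['0','1','2','3','4','5','6','7','8','9']     -- digits = '0123456789'
def pvNonzero : List Char := ['1','2','3','4','5','6','7','8','9']        -- nonzerodigits = '123456789'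
def pvOperators : List Char := ['+', '-']                                 -- operators = ['+', '-']

-- the while-loop of A's operator branch (position starts at 1)
def pvLoopOp (cs : List Char) (position : Nat) : Bool :=
  if _h : position < cs.length then
    if position = 1 ∧ PySem.Chars.find pvNonzero [cs.getD position ' '] = -1 then false
    else if 1 < position ∧ PySem.Chars.find pvDigits [cs.getD position ' '] = -1 then false
    else pvLoopOp cs (position + 1)
  else true
termination_by cs.length - position

-- the while-loop of A's non-operator branch (position starts at 0)
def pvLoopStd (cs : List Char) (position : Nat) : Bool :=
  if _h : position < cs.length then
    if position = 0 ∧ PySem.Chars.find pvNonzero [cs.getD position ' '] = -1 then false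
    else if 0 < position ∧ PySem.Chars.find pvDigits [cs.getD position ' '] = -1 then false
    else pvLoopStd cs (position + 1)
  else true
termination_by cs.length - position

def isValidNumericConstant (constant : String) : Bool :=
  let cs := constant.toList
  match PySem.List.pyGet? cs 0 with
  | none => false          -- constant[0] raises IndexError on "": outside Pre_
  | some c0 =>
    if c0 ∈ pvOperators ∧ cs.length = 1 then false
    else if c0 ∈ pvOperators then
      match PySem.List.pyGet? cs 1 with
      | none => false      -- unreachable: length = 1 already returned
      | some c1 =>
        if c1 = '0' then false
        else if cs.length = 2 ∧ -1 < PySem.Chars.find pvNonzero [c1] then true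
        else pvLoopOp cs 1
    else
      if cs.length = 1 ∧ -1 < PySem.Chars.find pvDigits [c0] then true
      else pvLoopStd cs 0

-- ===== PORT B =====
def isValidNumericConstant_alt (constant : String) : Bool :=
  if constant = "0" then true
  else
    let cs := constant.toList
    let body :=
      if PySem.Chars.isIn (PySem.List.slice cs none (some 1)) ['+', '-']
      then PySem.List.slice cs (some 1) none
      else cs
    PySem.Chars.strIsdigit body && !(PySem.Chars.startswith body ['0'])

-- ===== PRECONDITION & SPEC =====
-- Pre_ excludes only the empty string, on which A raises IndexError (constant[0]).
def Pre_isValidNumericConstant (constant : String) : Prop := constant.toList ≠ []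
instance (constant : String) : Decidable (Pre_isValidNumericConstant constant) := by unfold Pre_isValidNumericConstant; infer_instance
def pvWitness_isValidNumericConstant : String := "10"

def Spec_isValidNumericConstant (constant : String) (out : Bool) : Prop := out = isValidNumericConstant_alt constant
instance (constant : String) (out : Bool) : Decidable (Spec_isValidNumericConstant constant out) := by unfold Spec_isValidNumericConstant; infer_instance

-- ===== CLAIM (what is proved, stated in full; the proofs are below) =====
def Claim_equal_isValidNumericConstant : Prop := ∀ (constant : String), Dom_isValidNumericConstant constant → Pre_isValidNumericConstant constant → Spec_isValidNumericConstant constant (isValidNumericConstant constant)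

-- ===== LEMMAS AND PROOFS =====

-- character-class facts
lemma find_digits_eq_neg_one (c : Char) :
    PySem.Chars.find pvDigits [c] = -1 ↔ PySem.Chars.isdigit c = false := by
  rw [PySem.Chars.find_eq_neg_one_iff, List.singleton_infix_iff]
  simp [pvDigits, PySem.Chars.isdigit, Char.ext_iff, UInt32.ext_iff, Char.le_def,
    UInt32.le_iff_toNat_le]
  omega

lemma find_nonzero_eq_neg_one (c : Char) :
    PySem.Chars.find pvNonzero [c] = -1 ↔ ¬ ('1' ≤ c ∧ c ≤ '9') := by
  rw [PySem.Chars.find_eq_neg_one_iff, List.singleton_infix_iff]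
  simp [pvNonzero, Char.ext_iff, UInt32.ext_iff, Char.le_def, UInt32.le_iff_toNat_le]
  omega

lemma neg_one_lt_find_nonzero (c : Char) :
    -1 < PySem.Chars.find pvNonzero [c] ↔ ('1' ≤ c ∧ c ≤ '9') := by
  have h := PySem.Chars.neg_one_le_find pvNonzero [c]
  rw [← not_iff_not, not_lt]
  constructor
  · intro hle; exact (find_nonzero_eq_neg_one c).mp (le_antisymm hle h)
  · intro hc; rw [(find_nonzero_eq_neg_one c).mpr hc]

lemma neg_one_lt_find_digits (c : Char) :
    -1 < PySem.Chars.find pvDigits [c] ↔ PySem.Chars.isdigit c = true := by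
  have h := PySem.Chars.neg_one_le_find pvDigits [c]
  rw [← not_iff_not, not_lt, Bool.not_eq_true]
  constructor
  · intro hle; exact (find_digits_eq_neg_one c).mp (le_antisymm hle h)
  · intro hd; rw [(find_digits_eq_neg_one c).mpr hd]

lemma nz_eq_isdigit_ne_zero (c : Char) :
    ('1' ≤ c ∧ c ≤ '9') ↔ (PySem.Chars.isdigit c = true ∧ c ≠ '0') := by
  simp [PySem.Chars.isdigit, Char.ext_iff, UInt32.ext_iff, Char.le_def, UInt32.le_iff_toNat_le]
  omega

-- loop tails: once past the first checked position both loops just scan digits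
lemma pvLoopOp_ge_two (cs : List Char) (p : Nat) (hp : 2 ≤ p) :
    pvLoopOp cs p = (cs.drop p).all PySem.Chars.isdigit := by
  by_cases h : p < cs.length
  · rw [pvLoopOp, dif_pos h, List.drop_eq_getElem_cons h, List.all_cons]
    have h1 : ¬ (p = 1 ∧ PySem.Chars.find pvNonzero [cs.getD p ' '] = -1) := by
      rintro ⟨rfl, -⟩; omega
    rw [if_neg h1]
    have hget : cs.getD p ' ' = cs[p] := List.getD_eq_getElem cs ' ' h
    by_cases hd : PySem.Chars.isdigit cs[p]
    · rw [if_neg, pvLoopOp_ge_two cs (p + 1) (by omega), hd, Bool.true_and]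
      rintro ⟨-, hfind⟩
      rw [hget, find_digits_eq_neg_one] at hfind
      simp [hd] at hfind
    · rw [if_pos ⟨by omega, by rw [hget, find_digits_eq_neg_one]; simpa using hd⟩]
      simp [hd]
  · rw [pvLoopOp, dif_neg h, List.drop_eq_nil_of_le (by omega), List.all_nil]
termination_by cs.length - p

lemma pvLoopStd_ge_one (cs : List Char) (p : Nat) (hp : 1 ≤ p) :
    pvLoopStd cs p = (cs.drop p).all PySem.Chars.isdigit := by
  by_cases h : p < cs.length
  · rw [pvLoopStd, dif_pos h, List.drop_eq_getElem_cons h, List.all_cons]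
    have h1 : ¬ (p = 0 ∧ PySem.Chars.find pvNonzero [cs.getD p ' '] = -1) := by
      rintro ⟨rfl, -⟩; omega
    rw [if_neg h1]
    have hget : cs.getD p ' ' = cs[p] := List.getD_eq_getElem cs ' ' h
    by_cases hd : PySem.Chars.isdigit cs[p]
    · rw [if_neg, pvLoopStd_ge_one cs (p + 1) (by omega), hd, Bool.true_and]
      rintro ⟨-, hfind⟩
      rw [hget, find_digits_eq_neg_one] at hfind
      simp [hd] at hfind
    · rw [if_pos ⟨by omega, by rw [hget, find_digits_eq_neg_one]; simpa using hd⟩]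
      simp [hd]
  · rw [pvLoopStd, dif_neg h, List.drop_eq_nil_of_le (by omega), List.all_nil]
termination_by cs.length - p

lemma pvLoopOp_one (c0 c1 : Char) (rest : List Char) :
    pvLoopOp (c0 :: c1 :: rest) 1 =
      (decide ('1' ≤ c1 ∧ c1 ≤ '9') && rest.all PySem.Chars.isdigit) := by
  rw [pvLoopOp]
  simp only [List.length_cons, List.getD_cons_succ, List.getD_cons_zero]
  rw [dif_pos (by omega)]
  by_cases hnz : '1' ≤ c1 ∧ c1 ≤ '9'
  · rw [if_neg, if_neg (by omega)]
    · rw [pvLoopOp_ge_two _ 2 (by omega)]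
      simp [hnz]
    · rintro ⟨-, hf⟩; exact (find_nonzero_eq_neg_one c1).mp hf hnz
  · rw [if_pos ⟨by trivial, (find_nonzero_eq_neg_one c1).mpr hnz⟩]
    simp [hnz]

lemma pvLoopStd_zero (c0 : Char) (rest : List Char) :
    pvLoopStd (c0 :: rest) 0 =
      (decide ('1' ≤ c0 ∧ c0 ≤ '9') && rest.all PySem.Chars.isdigit) := by
  rw [pvLoopStd]
  simp only [List.length_cons, List.getD_cons_zero]
  rw [dif_pos (by omega)]
  by_cases hnz : '1' ≤ c0 ∧ c0 ≤ '9'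
  · rw [if_neg, if_neg (by omega)]
    · rw [pvLoopStd_ge_one _ 1 (by omega)]
      simp [hnz]
    · rintro ⟨-, hf⟩; exact (find_nonzero_eq_neg_one c0).mp hf hnz
  · rw [if_pos ⟨by trivial, (find_nonzero_eq_neg_one c0).mpr hnz⟩]
    simp [hnz]

-- B's sign test: a one-character string is a substring of '+-' iff it is '+' or '-'
lemma isIn_plus_minus (c : Char) :
    PySem.Chars.isIn [c] ['+', '-'] = true ↔ (c = '+' ∨ c = '-') := by
  rw [PySem.Chars.isIn_iff_infix, List.singleton_infix_iff]
  simp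

lemma string_eq_zero_iff (s : String) : s = "0" ↔ s.toList = ['0'] :=
  ⟨fun h => h ▸ rfl, fun h => String.toList_inj.mp h⟩

-- the normal forms of the two programs on a nonempty character list
lemma alt_eq (s : String) (c0 : Char) (rest : List Char) (h : s.toList = c0 :: rest) :
    isValidNumericConstant_alt s =
      if c0 :: rest = ['0'] then true
      else
        let body := if c0 = '+' ∨ c0 = '-' then rest else c0 :: rest
        PySem.Chars.strIsdigit body && !(PySem.Chars.startswith body ['0']) := by
  by_cases hz : c0 :: rest = ['0']
  · have hs : s = "0" := (string_eq_zero_iff s).mpr (by rw [h, hz])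
    rw [hs, if_pos hz]; decide
  · have hs : ¬ s = "0" := fun hh => hz (by rw [← h, hh]; rfl)
    rw [isValidNumericConstant_alt, if_neg hs, h]
    simp only [if_neg hz]
    have h1 : PySem.List.slice (c0 :: rest) none (some 1) = [c0] := by
      simp [PySem.List.slice]
    rw [h1, PySem.List.slice_from_one]
    by_cases hop : c0 = '+' ∨ c0 = '-'
    · rw [if_pos ((isIn_plus_minus c0).mpr hop)]
      simp [hop]
    · rw [if_neg (by simpa using fun hc => hop ((isIn_plus_minus c0).mp hc))]
      simp [hop]

theorem pv_main (s : String) (hpre : Pre_isValidNumericConstant s) :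
    isValidNumericConstant s = isValidNumericConstant_alt s := by
  obtain ⟨c0, rest, h⟩ : ∃ c0 rest, s.toList = c0 :: rest := by
    cases hcs : s.toList with
    | nil => exact absurd hcs hpre
    | cons a l => exact ⟨a, l, rfl⟩
  rw [alt_eq s c0 rest h, isValidNumericConstant]
  simp only [h]
  have hget0 : PySem.List.pyGet? (c0 :: rest) (0 : Int) = some c0 := by
    simp [PySem.List.pyGet?, PySem.List.pyIdx?]
  rw [hget0]
  show (if c0 ∈ pvOperators ∧ (c0 :: rest).length = 1 then false
    else if c0 ∈ pvOperators then
      match PySem.List.pyGet? (c0 :: rest) 1 with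
      | none => false
      | some c1 =>
        if c1 = '0' then false
        else if (c0 :: rest).length = 2 ∧ -1 < PySem.Chars.find pvNonzero [c1] then true
        else pvLoopOp (c0 :: rest) 1
    else
      if (c0 :: rest).length = 1 ∧ -1 < PySem.Chars.find pvDigits [c0] then true
      else pvLoopStd (c0 :: rest) 0) = _
  by_cases hop : c0 ∈ pvOperators
  · have hop' : c0 = '+' ∨ c0 = '-' := by simpa [pvOperators] using hop
    have hz : ¬ (c0 :: rest = ['0']) := by
      rcases hop' with rfl | rfl <;> simp
    rw [if_neg hz]
    cases rest with
    | nil =>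
      rw [if_pos ⟨hop, rfl⟩]
      simp only [if_pos hop']
      simp [PySem.Chars.strIsdigit]
    | cons c1 rest2 =>
      rw [if_neg (by rintro ⟨-, hl⟩; simp at hl), if_pos hop]
      have hget1 : PySem.List.pyGet? (c0 :: c1 :: rest2) (1 : Int) = some c1 := by
        simp [PySem.List.pyGet?, PySem.List.pyIdx?]
      rw [hget1]
      simp only [if_pos hop']
      show (if c1 = '0' then false
        else if (c0 :: c1 :: rest2).length = 2 ∧ -1 < PySem.Chars.find pvNonzero [c1] then true
        else pvLoopOp (c0 :: c1 :: rest2) 1) = _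
      by_cases h10 : c1 = '0'
      · subst h10
        rw [if_pos rfl]
        simp [PySem.Chars.strIsdigit, PySem.Chars.startswith, List.isPrefixOf]
      · rw [if_neg h10]
        have hB : (PySem.Chars.strIsdigit (c1 :: rest2) &&
            !(PySem.Chars.startswith (c1 :: rest2) ['0'])) =
            (decide ('1' ≤ c1 ∧ c1 ≤ '9') && rest2.all PySem.Chars.isdigit) := by
          have h01 : ('0' == c1) = false := by
            simp only [beq_eq_false_iff_ne]; exact fun hh => h10 hh.symm
          simp only [PySem.Chars.strIsdigit, PySem.Chars.startswith, List.isPrefixOf,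
            List.isEmpty_cons, List.all_cons, Bool.not_false, Bool.true_and, h01,
            Bool.and_true]
          by_cases hd : PySem.Chars.isdigit c1 = true
          · rw [show decide ('1' ≤ c1 ∧ c1 ≤ '9') = true from by
              simp [nz_eq_isdigit_ne_zero, hd, h10]]
            simp [hd]
          · simp only [Bool.not_eq_true] at hd
            rw [show decide ('1' ≤ c1 ∧ c1 ≤ '9') = false from by
              simp only [decide_eq_false_iff_not]
              intro hc; exact absurd ((nz_eq_isdigit_ne_zero c1).mp hc).1 (by simp [hd])]
            simp [hd]
        rw [hB]
        by_cases h2 : (c0 :: c1 :: rest2).length = 2 ∧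
            -1 < PySem.Chars.find pvNonzero [c1]
        · rw [if_pos h2]
          obtain ⟨hlen, hnz⟩ := h2
          have hre : rest2 = [] := by
            simp only [List.length_cons] at hlen
            exact List.eq_nil_of_length_eq_zero (by omega)
          subst hre
          rw [neg_one_lt_find_nonzero] at hnz
          simp [hnz]
        · rw [if_neg h2, pvLoopOp_one]
  · have hop' : ¬ (c0 = '+' ∨ c0 = '-') := by simpa [pvOperators] using hop
    rw [if_neg (by rintro ⟨hc, -⟩; exact hop hc), if_neg hop]
    simp only [if_neg hop']
    cases rest with
    | nil =>
      by_cases hd : PySem.Chars.isdigit c0 = true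
      · rw [if_pos ⟨rfl, (neg_one_lt_find_digits c0).mpr hd⟩]
        by_cases hz0 : c0 = '0'
        · subst hz0; simp
        · have h00 : ('0' == c0) = false := by
            simp only [beq_eq_false_iff_ne]; exact fun hh => hz0 hh.symm
          rw [if_neg (by simpa using hz0)]
          simp [PySem.Chars.strIsdigit, PySem.Chars.startswith, List.isPrefixOf, hd, h00]
      · simp only [Bool.not_eq_true] at hd
        rw [if_neg (by rintro ⟨-, hf⟩; rw [neg_one_lt_find_digits] at hf; simp [hd] at hf),
          pvLoopStd_zero]
        have hz0 : ¬ c0 = '0' := by rintro rfl; simp [PySem.Chars.isdigit] at hd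
        rw [if_neg (by simpa using hz0),
          show decide ('1' ≤ c0 ∧ c0 ≤ '9') = false from by
            simp only [decide_eq_false_iff_not]
            intro hc; exact absurd ((nz_eq_isdigit_ne_zero c0).mp hc).1 (by simp [hd])]
        simp [PySem.Chars.strIsdigit, hd]
    | cons c1 rest2 =>
      rw [if_neg (show ¬((c0 :: c1 :: rest2).length = 1 ∧
            -1 < PySem.Chars.find pvDigits [c0]) from by rintro ⟨hl, -⟩; simp at hl),
        if_neg (show ¬(c0 :: c1 :: rest2 = ['0']) from by simp), pvLoopStd_zero]
      by_cases hd : PySem.Chars.isdigit c0 = true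
      · by_cases hz0 : c0 = '0'
        · subst hz0
          rw [show decide ('1' ≤ '0' ∧ '0' ≤ '9') = false from by decide]
          simp [PySem.Chars.strIsdigit, PySem.Chars.startswith, List.isPrefixOf]
        · have h00 : ('0' == c0) = false := by
            simp only [beq_eq_false_iff_ne]; exact fun hh => hz0 hh.symm
          rw [show decide ('1' ≤ c0 ∧ c0 ≤ '9') = true from by
            simp [nz_eq_isdigit_ne_zero, hd, hz0]]
          simp [PySem.Chars.strIsdigit, PySem.Chars.startswith, List.isPrefixOf, hd, h00]
      · simp only [Bool.not_eq_true] at hd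
        rw [show decide ('1' ≤ c0 ∧ c0 ≤ '9') = false from by
          simp only [decide_eq_false_iff_not]
          intro hc; exact absurd ((nz_eq_isdigit_ne_zero c0).mp hc).1 (by simp [hd])]
        simp [PySem.Chars.strIsdigit, hd]

-- ===== VERDICT (by name: the statement is the Claim_ definition above) =====
theorem isValidNumericConstant_spec : Claim_equal_isValidNumericConstant := by
  intro s _ hpre
  exact pv_main s hpre
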